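-- pv_equiv track=rewrite | github.com/daemonless/daemonless-site-test | scripts/sync_docs.py | generate_nav_entries
-- ===== SOURCE A (Python) =====
-- def generate_nav_entries(images: dict) -> list[str]:
--     """Generate the YAML lines for the Images navigation section."""
--     lines = ["  - Images:", "    - Overview: images/index.md"]
--
--     # Group by category
--     by_category: dict[str, list[str]] = {}
--     for name, config in images.items():
--         category = config.get("category", "Uncategorized")
--         by_category.setdefault(category, []).append(name)
--
--     # Sort categories and items
--     for category in sorted(by_category.keys()):
--         lines.append(f"    - {category}:")
--         for name in sorted(by_category[category]):
--             display_name = images[name].get("title", name.title())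
--             lines.append(f"      - {display_name}: images/{name}.md")
--
--     return lines
-- ===== SOURCE B (Python) =====
-- def generate_nav_entries(images: dict) -> list[str]:
--     """Generate the YAML lines for the Images navigation section."""
--     lines = ["  - Images:", "    - Overview: images/index.md"]
--     pairs = sorted(
--         (config.get("category", "Uncategorized"), name)
--         for name, config in images.items()
--     )
--     prev = None
--     for category, name in pairs:
--         if prev != category:
--             lines.append(f"    - {category}:")
--             prev = category
--         display_name = images[name].get("title", name.title())
--         lines.append(f"      - {display_name}: images/{name}.md")
--     return lines
-- ===== Notes on version B (the rewrite author's own statement) =====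
-- stated objective: alternative
-- what changed: B replaces A's dict-of-lists grouping followed by a sort of the categories and a sort inside each category with a single lexicographic sort of all (category, name) pairs scanned once with change detection to emit headers.
import Mathlib
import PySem

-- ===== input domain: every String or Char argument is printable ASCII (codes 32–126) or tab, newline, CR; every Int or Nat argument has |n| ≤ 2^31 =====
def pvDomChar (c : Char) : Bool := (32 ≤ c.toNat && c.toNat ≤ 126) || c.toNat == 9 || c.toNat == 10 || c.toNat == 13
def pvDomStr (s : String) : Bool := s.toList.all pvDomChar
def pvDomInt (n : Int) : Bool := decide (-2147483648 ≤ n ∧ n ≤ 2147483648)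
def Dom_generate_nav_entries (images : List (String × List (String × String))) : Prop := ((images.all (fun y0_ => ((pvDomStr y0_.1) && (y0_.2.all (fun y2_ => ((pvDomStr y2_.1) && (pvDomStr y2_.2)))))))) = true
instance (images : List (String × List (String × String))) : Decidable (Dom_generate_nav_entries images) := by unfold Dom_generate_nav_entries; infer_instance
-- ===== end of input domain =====

-- B replaces A's dict-of-lists grouping plus nested per-category sorts by one lexicographic
-- sort of (category, name) pairs scanned once with change detection (objective: alternative
-- decomposition, same asymptotic cost).

-- Shared helpers: Python's str.title() (hand-ported, exact on the ASCII domain: a letter is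
-- uppercased after a non-letter and lowercased after a letter), and the three f-strings /
-- lookups both Pythons perform verbatim.
def pvTitleGo : Bool → List Char → List Char
  | _, [] => []
  | prevCased, c :: t =>
    (if PySem.Chars.isalpha c then
        (if prevCased then PySem.Chars.lowerChar c else PySem.Chars.upperChar c)
      else c) :: pvTitleGo (PySem.Chars.isalpha c) t

def pvTitle (s : String) : String := String.ofList (pvTitleGo false s.toList)

-- config.get("category", "Uncategorized")   (config is a Python dict)
def pvCat (cfg : List (String × String)) : String :=
  (PySem.Dict.ofList cfg).getD "category" "Uncategorized"

-- f"    - {category}:"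
def pvHdr (c : String) : String := "    - " ++ c ++ ":"

-- f"      - {display_name}: images/{name}.md" with display_name = images[name].get("title", name.title())
def pvEntry (d : PySem.Dict String (List (String × String))) (name : String) : String :=
  "      - " ++ ((PySem.Dict.ofList (d.getD name [])).getD "title" (pvTitle name)) ++
    ": images/" ++ name ++ ".md"

-- ===== PORT A =====
def generate_nav_entries (images : List (String × List (String × String))) : List String :=
  let d : PySem.Dict String (List (String × String)) := PySem.Dict.ofList images
  let lines : List String := ["  - Images:", "    - Overview: images/index.md"]
  let by_category : PySem.Dict String (List String) :=
    d.items.foldl (fun bc p => bc.modify (pvCat p.2) [] (fun l => l ++ [p.1]))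
      PySem.Dict.empty
  (PySem.List.sorted by_category.keys (fun x => x) false).foldl
    (fun lines category =>
      (PySem.List.sorted (by_category.getD category []) (fun x => x) false).foldl
        (fun lines name => lines ++ [pvEntry d name])
        (lines ++ [pvHdr category]))
    lines

-- ===== PORT B =====
-- one step of B's scan: emit the category header when prev changes, then the entry line
def pvStep (d : PySem.Dict String (List (String × String)))
    (st : List String × Option String) (q : String × String) : List String × Option String :=
  let st1 := if st.2 = some q.1 then st else (st.1 ++ [pvHdr q.1], some q.1)
  (st1.1 ++ [pvEntry d q.2], st1.2)

def generate_nav_entries_alt (images : List (String × List (String × String))) : List String :=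
  let d : PySem.Dict String (List (String × String)) := PySem.Dict.ofList images
  let lines : List String := ["  - Images:", "    - Overview: images/index.md"]
  let pairs := PySem.List.sorted2 (d.items.map (fun p => (pvCat p.2, p.1)))
    (fun q => q.1) (fun q => q.2) false
  (pairs.foldl (pvStep d) (lines, (none : Option String))).1

-- ===== PRECONDITION & SPEC =====
def Spec_generate_nav_entries (images : List (String × List (String × String))) (out : List String) : Prop := out = generate_nav_entries_alt images
instance (images : List (String × List (String × String))) (out : List String) : Decidable (Spec_generate_nav_entries images out) := by unfold Spec_generate_nav_entries; infer_instance

-- ===== CLAIM (what is proved, stated in full; the proofs are below) =====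
def Claim_equal_generate_nav_entries : Prop := ∀ (images : List (String × List (String × String))), Dom_generate_nav_entries images → Spec_generate_nav_entries images (generate_nav_entries images)

-- ===== LEMMAS AND PROOFS =====

-- lexicographic ≤ on (category, name) pairs, the order sorted2 realises
def pvLexLe (a b : String × String) : Prop := a.1 < b.1 ∨ (a.1 = b.1 ∧ a.2 ≤ b.2)

theorem pvLexLe_trans {a b c : String × String} (h1 : pvLexLe a b) (h2 : pvLexLe b c) :
    pvLexLe a c := by
  rcases h1 with h1 | ⟨e1, l1⟩ <;> rcases h2 with h2 | ⟨e2, l2⟩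
  · exact Or.inl (lt_trans h1 h2)
  · exact Or.inl (e2 ▸ h1)
  · exact Or.inl (e1 ▸ h2)
  · exact Or.inr ⟨e1.trans e2, le_trans l1 l2⟩

-- the Boolean comparator sorted2 uses for tuple keys (fst, snd)
def pvBefore (a b : String × String) : Bool :=
  decide (a.1 < b.1) || (!decide (b.1 < a.1) && decide (a.2 < b.2))

theorem pvBefore_true {a b : String × String} (h : pvBefore a b = true) : pvLexLe a b := by
  simp only [pvBefore, Bool.or_eq_true, Bool.and_eq_true, Bool.not_eq_eq_eq_not, Bool.not_true,
    decide_eq_true_eq, decide_eq_false_iff_not] at h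
  rcases h with h | ⟨h1, h2⟩
  · exact Or.inl h
  · rcases lt_or_eq_of_le (le_of_not_gt h1) with h | h
    · exact Or.inl h
    · exact Or.inr ⟨h, le_of_lt h2⟩

theorem pvBefore_false {a b : String × String} (h : pvBefore a b = false) : pvLexLe b a := by
  simp only [pvBefore, Bool.or_eq_false_iff, Bool.and_eq_false_iff, Bool.not_eq_eq_eq_not,
    Bool.not_false, decide_eq_true_eq, decide_eq_false_iff_not] at h
  obtain ⟨h1, h2⟩ := h
  rcases lt_or_eq_of_le (le_of_not_gt h1) with hlt | heq
  · exact Or.inl hlt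
  · rcases h2 with h2 | h2
    · exact Or.inl h2
    · exact Or.inr ⟨heq, le_of_not_gt h2⟩

theorem pv_insertBy_pairwise (x : String × String) (ys : List (String × String))
    (h : ys.Pairwise pvLexLe) :
    (PySem.List.insertBy pvBefore x ys).Pairwise pvLexLe := by
  induction ys with
  | nil => simp [PySem.List.insertBy]
  | cons y ys ih =>
    rw [List.pairwise_cons] at h
    obtain ⟨hy, hys⟩ := h
    by_cases hb : pvBefore x y = true
    · rw [PySem.List.insertBy, if_pos hb, List.pairwise_cons]
      refine ⟨?_, List.pairwise_cons.mpr ⟨hy, hys⟩⟩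
      intro z hz
      rcases List.mem_cons.mp hz with rfl | hz
      · exact pvBefore_true hb
      · exact pvLexLe_trans (pvBefore_true hb) (hy z hz)
    · rw [PySem.List.insertBy, if_neg hb, List.pairwise_cons]
      refine ⟨?_, ih hys⟩
      intro z hz
      rcases (PySem.List.insertBy_mem_iff pvBefore x z ys).mp hz with rfl | hz
      · exact pvBefore_false (Bool.eq_false_iff.mpr hb)
      · exact hy z hz

theorem pv_foldl_insertBy_pairwise (pl : List (String × String)) :
    ∀ acc : List (String × String), acc.Pairwise pvLexLe →
    (pl.foldl (fun acc x => PySem.List.insertBy pvBefore x acc) acc).Pairwise pvLexLe := by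
  induction pl with
  | nil => intro acc h; simpa using h
  | cons p pl ih =>
    intro acc h
    exact ih _ (pv_insertBy_pairwise p acc h)

theorem pv_sorted2_pairwise (pl : List (String × String)) :
    (PySem.List.sorted2 pl (fun q => q.1) (fun q => q.2) false).Pairwise pvLexLe := by
  have : PySem.List.sorted2 pl (fun q => q.1) (fun q => q.2) false
      = pl.foldl (fun acc x => PySem.List.insertBy pvBefore x acc) [] := rfl
  rw [this]
  exact pv_foldl_insertBy_pairwise pl [] List.Pairwise.nil

-- Set.ofList is a sublist of its argument (first occurrences, in order)
theorem pv_ofList_sublist {α : Type} [BEq α] [LawfulBEq α] (l : List α) :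
    (PySem.Set.ofList l).Sublist l := by
  induction l with
  | nil => simp [PySem.Set.ofList]
  | cons x xs ih =>
    rw [PySem.Set.ofList_cons]
    exact List.Sublist.cons₂ x (List.Sublist.trans (List.filter_sublist) ih)

-- dedup of a run-prefixed list
theorem pv_ofList_run (c : String) (xs ys : List String)
    (hx : ∀ x ∈ xs, x = c) (hy : c ∉ ys) :
    PySem.Set.ofList (c :: (xs ++ ys)) = c :: PySem.Set.ofList ys := by
  have hx' : ∀ l : List String, (∀ x ∈ l, x = c) → l.foldl PySem.Set.add [c] = [c] := by
    intro l
    induction l with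
    | nil => intro _; rfl
    | cons x t ih =>
      intro hl
      have hxc : x = c := hl x (List.mem_cons_self ..)
      have hadd : PySem.Set.add [c] x = [c] := by
        subst hxc; simp [PySem.Set.add]
      rw [List.foldl_cons, hadd]
      exact ih (fun y hy => hl y (List.mem_cons_of_mem _ hy))
  rw [PySem.Set.ofList_eq_foldl, List.foldl_cons, List.foldl_append]
  have h1 : PySem.Set.add [] c = [c] := by simp [PySem.Set.add, PySem.Set.contains]
  rw [h1, hx' xs hx]
  have : ys.foldl PySem.Set.add [c] = PySem.Set.update [c] ys := rfl
  rw [this, PySem.Set.update_eq_append_filter]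
  have : List.filter (fun y => !PySem.Set.contains [c] y) (PySem.Set.ofList ys)
      = PySem.Set.ofList ys := by
    rw [List.filter_eq_self]
    intro a ha
    have : a ∈ ys := (PySem.Set.mem_ofList ys a).mp ha
    have hac : a ≠ c := fun h => hy (h ▸ this)
    simp [PySem.Set.contains, hac]
  rw [this]
  rfl

-- A's nested append-loops, abstractly
theorem pv_A_shape (K : List String) (nm : String → List String)
    (e : String → String) (lines : List String) :
    K.foldl (fun lines c =>
        (nm c).foldl (fun lines n => lines ++ [e n]) (lines ++ [pvHdr c])) lines
      = lines ++ K.flatMap (fun c => pvHdr c :: (nm c).map e) := by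
  induction K generalizing lines with
  | nil => simp
  | cons c K ih =>
    rw [List.foldl_cons, PySem.List.foldl_append_singleton_eq_map, ih, List.flatMap_cons]
    simp [List.append_assoc]

-- B's scan over a run of one category
theorem pv_run_scan (d : PySem.Dict String (List (String × String)))
    (c : String) (run : List (String × String)) (hr : ∀ p ∈ run, p.1 = c)
    (L : List String) :
    run.foldl (pvStep d) (L, some c) = (L ++ run.map (fun p => pvEntry d p.2), some c) := by
  induction run generalizing L with
  | nil => simp
  | cons p t ih =>
    have hp : p.1 = c := hr p (List.mem_cons_self ..)
    have hstep : pvStep d (L, some c) p = (L ++ [pvEntry d p.2], some c) := by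
      simp [pvStep, hp]
    rw [List.foldl_cons, hstep, ih (fun x hx => hr x (List.mem_cons_of_mem _ hx))]
    simp

-- a stale prev that cannot match the next pair behaves like none
theorem pv_skip_prev (d : PySem.Dict String (List (String × String)))
    (c : String) (rest : List (String × String))
    (h : ∀ r ∈ rest.head?, r.1 ≠ c) (L : List String) :
    (rest.foldl (pvStep d) (L, some c)).1 = (rest.foldl (pvStep d) (L, none)).1 := by
  cases rest with
  | nil => rfl
  | cons r t =>
    have hrc : r.1 ≠ c := h r (by simp)
    have hstep : pvStep d (L, some c) r = pvStep d (L, none) r := by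
      have h1 : ¬ ((some c : Option String) = some r.1) := by
        intro hh; exact hrc (Option.some.inj hh).symm
      simp [pvStep, h1]
    rw [List.foldl_cons, List.foldl_cons, hstep]

-- B's scan of a lex-sorted list = A's flatMap over deduped categories with filtered names
theorem pv_scan_eq (d : PySem.Dict String (List (String × String))) :
    ∀ (n : Nat) (q : List (String × String)), q.length ≤ n → q.Pairwise pvLexLe →
    ∀ (lines : List String),
    (q.foldl (pvStep d) (lines, (none : Option String))).1
      = lines ++ (PySem.Set.ofList (q.map (fun p => p.1))).flatMap
          (fun c => pvHdr c :: (q.filter (fun p => p.1 == c)).map (fun p => pvEntry d p.2)) := by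
  intro n
  induction n with
  | zero =>
    intro q hlen _ lines
    have hq : q = [] := List.eq_nil_of_length_eq_zero (Nat.le_zero.mp hlen)
    subst hq; simp [PySem.Set.ofList]
  | succ n ih =>
    intro q hlen hq lines
    cases q with
    | nil => simp [PySem.Set.ofList]
    | cons p t =>
      obtain ⟨c, nm⟩ := p
      rw [List.pairwise_cons] at hq
      obtain ⟨hhead, ht⟩ := hq
      have htr : t.takeWhile (fun p => p.1 == c) ++ t.dropWhile (fun p => p.1 == c) = t :=
        List.takeWhile_append_dropWhile
      have hrun : ∀ p ∈ t.takeWhile (fun p : String × String => p.1 == c), p.1 = c := by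
        intro p hp
        simpa using List.mem_takeWhile_imp hp
      have hrest_pw : (t.dropWhile (fun p : String × String => p.1 == c)).Pairwise pvLexLe :=
        ht.sublist (List.dropWhile_sublist _)
      have hrest_lt : ∀ x ∈ t.dropWhile (fun p : String × String => p.1 == c), c < x.1 := by
        cases hr : t.dropWhile (fun p : String × String => p.1 == c) with
        | nil => intro x hx; simp at hx
        | cons r t' =>
          have hrne : t.dropWhile (fun p : String × String => p.1 == c) ≠ [] := by
            rw [hr]; exact List.cons_ne_nil r t'
          have hhd := List.head_dropWhile_not (fun p : String × String => p.1 == c) hrne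
          have hrc : r.1 ≠ c := by
            have : ((t.dropWhile (fun p : String × String => p.1 == c)).head hrne) = r := by
              simp [hr]
            rw [this] at hhd
            simpa using hhd
          have hrt : r ∈ t := (List.dropWhile_sublist _).subset (hr ▸ List.mem_cons_self ..)
          have hcr : c < r.1 := by
            rcases hhead r hrt with h | ⟨h, _⟩
            · exact h
            · exact absurd h.symm hrc
          intro x hx
          rcases List.mem_cons.mp hx with rfl | hx
          · exact hcr
          · have hpw : (r :: t').Pairwise pvLexLe := hr ▸ hrest_pw
            rcases (List.pairwise_cons.mp hpw).1 x hx with h | ⟨h, _⟩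
            · exact lt_trans hcr h
            · exact h ▸ hcr
      have hnotin : c ∉ (t.dropWhile (fun p : String × String => p.1 == c)).map (fun p => p.1) := by
        intro hc
        obtain ⟨x, hx, hx2⟩ := List.mem_map.mp hc
        exact absurd (hx2 ▸ hrest_lt x hx) (lt_irrefl c)
      -- LHS
      have hstep0 : pvStep d (lines, (none : Option String)) (c, nm)
          = (lines ++ [pvHdr c, pvEntry d nm], some c) := by
        simp [pvStep]
      rw [List.foldl_cons, hstep0, ← htr, List.foldl_append,
        pv_run_scan d c _ hrun]
      have hskip := pv_skip_prev d c (t.dropWhile (fun p : String × String => p.1 == c))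
        (by
          intro r hrmem
          have hmem : (t.dropWhile (fun p : String × String => p.1 == c)).head? = some r :=
            hrmem
          have hnp := List.head?_dropWhile_not (fun p : String × String => p.1 == c) t
          rw [hmem] at hnp
          simpa using hnp)
        ((lines ++ [pvHdr c, pvEntry d nm]) ++
          (t.takeWhile (fun p : String × String => p.1 == c)).map (fun p => pvEntry d p.2))
      rw [hskip]
      have hlen' : (t.dropWhile (fun p : String × String => p.1 == c)).length ≤ n := by
        have h1 : (t.dropWhile (fun p : String × String => p.1 == c)).length ≤ t.length :=
          (List.dropWhile_sublist _).length_le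
        have h2 : t.length + 1 ≤ n + 1 := by simpa using hlen
        omega
      rw [ih _ hlen' hrest_pw]
      -- RHS: q is now (c, nm) :: (takeWhile ++ dropWhile)
      simp only [List.map_cons, List.map_append]
      have hrunc : ∀ x ∈ (t.takeWhile (fun p : String × String => p.1 == c)).map
          (fun p => p.1), x = c := by
        intro x hx
        obtain ⟨p, hp, rfl⟩ := List.mem_map.mp hx
        exact hrun p hp
      rw [pv_ofList_run c _ _ hrunc hnotin, List.flatMap_cons]
      have hfilter_c : (((c, nm) :: (t.takeWhile (fun p : String × String => p.1 == c)
            ++ t.dropWhile (fun p : String × String => p.1 == c))).filter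
              (fun p => p.1 == c))
          = (c, nm) :: t.takeWhile (fun p : String × String => p.1 == c) := by
        rw [List.filter_cons_of_pos (by simp), List.filter_append]
        have h1 : (t.takeWhile (fun p : String × String => p.1 == c)).filter
            (fun p => p.1 == c) = t.takeWhile (fun p : String × String => p.1 == c) := by
          rw [List.filter_eq_self]
          intro a ha
          simpa using hrun a ha
        have h2 : (t.dropWhile (fun p : String × String => p.1 == c)).filter
            (fun p => p.1 == c) = [] := by
          rw [List.filter_eq_nil_iff]
          intro a ha
          simpa using ne_of_gt (hrest_lt a ha)
        rw [h1, h2, List.append_nil]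
      rw [hfilter_c]
      have hcong : ∀ c' ∈ PySem.Set.ofList ((t.dropWhile
            (fun p : String × String => p.1 == c)).map (fun p => p.1)),
          (pvHdr c' :: (((c, nm) :: (t.takeWhile (fun p : String × String => p.1 == c)
              ++ t.dropWhile (fun p : String × String => p.1 == c))).filter
                (fun p => p.1 == c')).map (fun p => pvEntry d p.2))
          = (pvHdr c' :: ((t.dropWhile (fun p : String × String => p.1 == c)).filter
              (fun p => p.1 == c')).map (fun p => pvEntry d p.2)) := by
        intro c' hc'
        have hmem : c' ∈ (t.dropWhile (fun p : String × String => p.1 == c)).map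
            (fun p => p.1) := (PySem.Set.mem_ofList _ _).mp hc'
        obtain ⟨x, hx, rfl⟩ := List.mem_map.mp hmem
        have hne : c ≠ x.1 := ne_of_lt (hrest_lt x hx)
        congr 1
        rw [List.filter_cons_of_neg (by simpa using hne), List.filter_append]
        have h1 : (t.takeWhile (fun p : String × String => p.1 == c)).filter
            (fun p => p.1 == x.1) = [] := by
          rw [List.filter_eq_nil_iff]
          intro a ha
          have ha' : a.1 = c := hrun a ha
          simp only [ha']
          exact fun hh => hne (by simpa using hh)
        rw [h1, List.nil_append]
      rw [List.flatMap_congr hcong]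
      simp [List.append_assoc]

theorem pv_lexle_fst_le {a b : String × String} (h : pvLexLe a b) : a.1 ≤ b.1 := by
  rcases h with h | ⟨h, _⟩
  · exact le_of_lt h
  · exact le_of_eq h

theorem pv_M1 (pl : List (String × String)) :
    PySem.List.sorted (PySem.Set.ofList (pl.map (fun p => p.1))) (fun x => x) false
      = PySem.Set.ofList
          ((PySem.List.sorted2 pl (fun q => q.1) (fun q => q.2) false).map (fun p => p.1)) := by
  apply PySem.List.sorted_id_eq_of_perm_of_pairwise
  · rw [List.perm_ext_iff_of_nodup (PySem.Set.nodup_ofList _) (PySem.Set.nodup_ofList _)]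
    intro a
    rw [PySem.Set.mem_ofList, PySem.Set.mem_ofList]
    exact ((PySem.List.sorted2_perm pl (fun q => q.1) (fun q => q.2) false).map
      (fun p => p.1)).mem_iff
  · have h1 : ((PySem.List.sorted2 pl (fun q => q.1) (fun q => q.2) false).map
        (fun p => p.1)).Pairwise (fun a b => a ≤ b) :=
      List.pairwise_map.mpr ((pv_sorted2_pairwise pl).imp pv_lexle_fst_le)
    exact h1.sublist (pv_ofList_sublist _)

theorem pv_M2 (pl : List (String × String)) (c : String) :
    PySem.List.sorted ((pl.filter (fun p => p.1 == c)).map (fun p => p.2)) (fun x => x) false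
      = ((PySem.List.sorted2 pl (fun q => q.1) (fun q => q.2) false).filter
          (fun p => p.1 == c)).map (fun p => p.2) := by
  apply PySem.List.sorted_id_eq_of_perm_of_pairwise
  · exact ((PySem.List.sorted2_perm pl (fun q => q.1) (fun q => q.2) false).filter
      _).map (fun p => p.2)
  · apply List.pairwise_map.mpr
    apply List.Pairwise.imp_of_mem ?_ ((pv_sorted2_pairwise pl).filter _)
    intro a b ha hb hab
    have ha' : a.1 = c := by simpa using (List.mem_filter.mp ha).2
    have hb' : b.1 = c := by simpa using (List.mem_filter.mp hb).2
    rcases hab with h | ⟨_, h⟩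
    · rw [ha', hb'] at h; exact absurd h (lt_irrefl c)
    · exact h

-- ===== VERDICT (by name: the statement is the Claim_ definition above) =====
theorem generate_nav_entries_spec : Claim_equal_generate_nav_entries := by
  unfold Claim_equal_generate_nav_entries Spec_generate_nav_entries
  intro images _
  simp only [generate_nav_entries, generate_nav_entries_alt]
  have h0 : ((PySem.Dict.ofList images).items.foldl
        (fun bc p => bc.modify (pvCat p.2) [] fun l => l ++ [p.1]) PySem.Dict.empty)
      = (((PySem.Dict.ofList images).items.map (fun p => (pvCat p.2, p.1))).foldl
        (fun bc q => bc.modify q.1 [] fun l => l ++ [q.2]) PySem.Dict.empty) :=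
    (List.foldl_map (f := fun p : String × List (String × String) => (pvCat p.2, p.1))
      (g := fun (bc : PySem.Dict String (List String)) (q : String × String) =>
        bc.modify q.1 [] fun l => l ++ [q.2])
      (l := (PySem.Dict.ofList images).items) (init := PySem.Dict.empty)).symm
  have hkeys : ((PySem.Dict.ofList images).items.foldl
        (fun bc p => bc.modify (pvCat p.2) [] fun l => l ++ [p.1]) PySem.Dict.empty).keys
      = PySem.Set.ofList (((PySem.Dict.ofList images).items.map
          (fun p => (pvCat p.2, p.1))).map (fun p => p.1)) := by
    rw [h0]
    have := PySem.Dict.keys_foldl_modify_key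
      ((PySem.Dict.ofList images).items.map (fun p => (pvCat p.2, p.1)))
      (fun q => q.1) ([] : List String) (fun _ q => fun l => l ++ [q.2]) PySem.Dict.empty
    simpa [PySem.Dict.keys_empty, PySem.Set.update_nil_left] using this
  have hgetD : ∀ c, ((PySem.Dict.ofList images).items.foldl
        (fun bc p => bc.modify (pvCat p.2) [] fun l => l ++ [p.1]) PySem.Dict.empty).getD c []
      = (((PySem.Dict.ofList images).items.map
          (fun p => (pvCat p.2, p.1))).filter (fun p => p.1 == c)).map (fun p => p.2) := by
    intro c
    rw [h0]
    simpa using PySem.Dict.getD_foldl_modify_append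
      ((PySem.Dict.ofList images).items.map (fun p => (pvCat p.2, p.1))) PySem.Dict.empty c
  simp only [pv_A_shape, hgetD, hkeys, pv_M1, pv_M2]
  rw [pv_scan_eq (PySem.Dict.ofList images)
    (PySem.List.sorted2 ((PySem.Dict.ofList images).items.map (fun p => (pvCat p.2, p.1)))
      (fun q => q.1) (fun q => q.2) false).length
    (PySem.List.sorted2 ((PySem.Dict.ofList images).items.map (fun p => (pvCat p.2, p.1)))
      (fun q => q.1) (fun q => q.2) false)
    le_rfl (pv_sorted2_pairwise _)]
  simp [List.map_map, Function.comp_def]
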